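-- pv_equiv track=rewrite | github.com/vladislav-karamfilov/Python-Playground | HackBulgaria-Programming101-Python-Course/week01/Dive-into-Python/matrix_bombing.py | _update_neighbours
-- ===== SOURCE A (Python) =====
-- def _update_neighbours(matrix, neighbours_coordinates, i, j, rows, columns):
--     bombed_matrix = [[] for _ in range(0, rows)]
--     for x in range(rows):
--         bombed_matrix[x] = [[] for _ in range(0, columns)]
--         for y in range(columns):
--             if (x, y) in neighbours_coordinates:
--                 if matrix[x][y] > matrix[i][j]:
--                     bombed_matrix[x][y] = matrix[x][y] - matrix[i][j]
--                 else:
--                     bombed_matrix[x][y] = 0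
--             else:
--                 bombed_matrix[x][y] = matrix[x][y]
--
--     return bombed_matrix
-- ===== SOURCE B (Python) =====
-- def _update_neighbours(matrix, neighbours_coordinates, i, j, rows, columns):
--     bombed = [[matrix[x][y] for y in range(columns)] for x in range(rows)]
--     for x, y in neighbours_coordinates:
--         if 0 <= x < rows and 0 <= y < columns:
--             v = matrix[x][y]
--             bombed[x][y] = v - matrix[i][j] if v > matrix[i][j] else 0
--     return bombed
-- ===== Notes on version B (the rewrite author's own statement) =====
-- stated objective: simpler
-- what changed: B replaces A's row-by-row double loop with a per-cell neighbour-membership test by a plain copy of the rows x columns sub-matrix followed by one targeted update pass over the neighbour-coordinate list.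
import Mathlib
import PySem

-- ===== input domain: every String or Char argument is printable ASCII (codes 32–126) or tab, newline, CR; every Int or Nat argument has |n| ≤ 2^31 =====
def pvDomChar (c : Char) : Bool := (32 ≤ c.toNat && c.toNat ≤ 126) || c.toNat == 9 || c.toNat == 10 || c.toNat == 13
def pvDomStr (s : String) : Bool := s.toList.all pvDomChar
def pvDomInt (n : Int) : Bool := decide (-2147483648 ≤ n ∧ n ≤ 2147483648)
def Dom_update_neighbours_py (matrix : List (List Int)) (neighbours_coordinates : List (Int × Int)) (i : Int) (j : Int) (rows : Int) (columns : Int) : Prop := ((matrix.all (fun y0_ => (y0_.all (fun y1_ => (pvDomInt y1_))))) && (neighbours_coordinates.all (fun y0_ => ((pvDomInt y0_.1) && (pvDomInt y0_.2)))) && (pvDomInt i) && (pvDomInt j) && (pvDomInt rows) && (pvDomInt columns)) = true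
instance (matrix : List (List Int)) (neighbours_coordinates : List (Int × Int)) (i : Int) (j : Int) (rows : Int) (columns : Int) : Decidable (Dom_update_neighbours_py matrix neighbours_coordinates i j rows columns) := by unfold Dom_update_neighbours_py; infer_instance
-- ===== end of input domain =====

-- B replaces A's membership-gated full double loop by a plain copy of the sub-matrix plus one
-- targeted update pass over the neighbour-coordinate list (objective: simpler, and faster when
-- the per-cell neighbour test dominates).

-- ===== PORT A =====
-- Literal port of A: preallocate `rows` placeholder rows, then for each x set row x to a
-- fresh placeholder row and assign every cell y in turn (Python's cell placeholders are `[]`;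
-- every cell is overwritten before the row is ever read or returned, so the typed placeholder
-- value 0 is never observable).
def update_neighbours_py (matrix : List (List Int)) (neighbours_coordinates : List (Int × Int)) (i : Int) (j : Int) (rows : Int) (columns : Int) : List (List Int) :=
  let init : List (List Int) := (PySem.List.pyRange 0 rows 1).map (fun _ => ([] : List Int))
  (PySem.List.pyRange 0 rows 1).foldl
    (fun bm x =>
      let bm := PySem.List.pySetD bm x ((PySem.List.pyRange 0 columns 1).map (fun _ => (0 : Int)))
      (PySem.List.pyRange 0 columns 1).foldl
        (fun bm y =>
          let v : Int :=
            if (x, y) ∈ neighbours_coordinates then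
              (if PySem.List.pyGetD (PySem.List.pyGetD matrix x []) y 0 >
                  PySem.List.pyGetD (PySem.List.pyGetD matrix i []) j 0 then
                 PySem.List.pyGetD (PySem.List.pyGetD matrix x []) y 0 -
                 PySem.List.pyGetD (PySem.List.pyGetD matrix i []) j 0
               else 0)
            else PySem.List.pyGetD (PySem.List.pyGetD matrix x []) y 0
          PySem.List.pySetD bm x (PySem.List.pySetD (PySem.List.pyGetD bm x []) y v))
        bm)
    init

-- ===== PORT B =====
def update_neighbours_py_alt (matrix : List (List Int)) (neighbours_coordinates : List (Int × Int)) (i : Int) (j : Int) (rows : Int) (columns : Int) : List (List Int) :=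
  let bombed : List (List Int) :=
    (PySem.List.pyRange 0 rows 1).map (fun x =>
      (PySem.List.pyRange 0 columns 1).map (fun y =>
        PySem.List.pyGetD (PySem.List.pyGetD matrix x []) y 0))
  neighbours_coordinates.foldl
    (fun bm p =>
      if 0 ≤ p.1 ∧ p.1 < rows ∧ 0 ≤ p.2 ∧ p.2 < columns then
        let v : Int := PySem.List.pyGetD (PySem.List.pyGetD matrix p.1 []) p.2 0
        PySem.List.pySetD bm p.1
          (PySem.List.pySetD (PySem.List.pyGetD bm p.1 []) p.2
            (if v > PySem.List.pyGetD (PySem.List.pyGetD matrix i []) j 0 then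
               v - PySem.List.pyGetD (PySem.List.pyGetD matrix i []) j 0
             else 0))
      else bm)
    bombed

-- ===== PRECONDITION & SPEC =====
-- Pre_ is exactly the inputs on which the Python A returns normally: whenever both loop
-- bounds are positive the matrix must actually have `rows` rows of at least `columns` cells,
-- and whenever some neighbour coordinate is in range the bomb index (i, j) must be a valid
-- (possibly negative, Python-style) index; everywhere else A raises IndexError.
def Pre_update_neighbours_py (matrix : List (List Int)) (neighbours_coordinates : List (Int × Int)) (i : Int) (j : Int) (rows : Int) (columns : Int) : Prop :=
  (0 < rows ∧ 0 < columns →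
    rows ≤ (matrix.length : Int) ∧
    ∀ row ∈ matrix.take rows.toNat, columns ≤ (row.length : Int)) ∧
  ((∃ p ∈ neighbours_coordinates, 0 ≤ p.1 ∧ p.1 < rows ∧ 0 ≤ p.2 ∧ p.2 < columns) →
    PySem.Raise.InRange matrix.length i ∧
    PySem.Raise.InRange ((PySem.List.pyGet? matrix i).getD []).length j)
instance (matrix : List (List Int)) (neighbours_coordinates : List (Int × Int)) (i : Int) (j : Int) (rows : Int) (columns : Int) : Decidable (Pre_update_neighbours_py matrix neighbours_coordinates i j rows columns) := by unfold Pre_update_neighbours_py; infer_instance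

def pvWitness_update_neighbours_py : List (List Int) × (List (Int × Int)) × Int × Int × Int × Int :=
  ([[1, 2], [3, 4]], [(0, 1), (1, 0), (9, 9)], 0, 0, 2, 2)

def Spec_update_neighbours_py (matrix : List (List Int)) (neighbours_coordinates : List (Int × Int)) (i : Int) (j : Int) (rows : Int) (columns : Int) (out : List (List Int)) : Prop := out = update_neighbours_py_alt matrix neighbours_coordinates i j rows columns
instance (matrix : List (List Int)) (neighbours_coordinates : List (Int × Int)) (i : Int) (j : Int) (rows : Int) (columns : Int) (out : List (List Int)) : Decidable (Spec_update_neighbours_py matrix neighbours_coordinates i j rows columns out) := by unfold Spec_update_neighbours_py; infer_instance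

-- ===== CLAIM (what is proved, stated in full; the proofs are below) =====
def Claim_equal_update_neighbours_py : Prop := ∀ (matrix : List (List Int)) (neighbours_coordinates : List (Int × Int)) (i : Int) (j : Int) (rows : Int) (columns : Int), Dom_update_neighbours_py matrix neighbours_coordinates i j rows columns → Pre_update_neighbours_py matrix neighbours_coordinates i j rows columns → Spec_update_neighbours_py matrix neighbours_coordinates i j rows columns (update_neighbours_py matrix neighbours_coordinates i j rows columns)

-- ===== LEMMAS AND PROOFS =====
-- (The two Lean ports totalise Python's partial indexing with `pyGetD … 0`, so they agree on
-- every input; Pre_ is still needed for fidelity to the Pythons, which raise outside it.)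
def pvVal (matrix : List (List Int)) (neighbours_coordinates : List (Int × Int)) (i j x y : Int) : Int :=
  if (x, y) ∈ neighbours_coordinates then
    (if PySem.List.pyGetD (PySem.List.pyGetD matrix x []) y 0 >
        PySem.List.pyGetD (PySem.List.pyGetD matrix i []) j 0 then
       PySem.List.pyGetD (PySem.List.pyGetD matrix x []) y 0 -
       PySem.List.pyGetD (PySem.List.pyGetD matrix i []) j 0
     else 0)
  else PySem.List.pyGetD (PySem.List.pyGetD matrix x []) y 0

theorem pv_foldSet_range {α : Type} (g : Int → α) :
    ∀ (n : Nat) (r0 : List α), n ≤ r0.length →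
      (PySem.List.pyRange 0 (n : Int) 1).foldl (fun r y => PySem.List.pySetD r y (g y)) r0 =
        (List.range n).map (fun (k : Nat) => g (k : Int)) ++ r0.drop n := by
  intro n
  induction n with
  | zero => intro r0 _; simp [PySem.List.pyRange_one_eq_nil]
  | succ n ih =>
    intro r0 h
    have hc : (((n + 1 : Nat)) : Int) = (n : Int) + 1 := by push_cast; ring
    rw [hc, PySem.List.pyRange_one_succ_right (by positivity), List.foldl_append,
      ih r0 (by omega)]
    have hn : n < r0.length := by omega
    have hdrop : r0.drop n = r0[n] :: r0.drop (n + 1) := List.drop_eq_getElem_cons hn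
    simp only [List.foldl_cons, List.foldl_nil, PySem.List.pySetD_natCast]
    rw [hdrop, List.set_append_right _ _ (by simp), List.range_succ]
    simp
    rw [hdrop, List.set_cons_zero]

theorem pv_rowfold (v : Int → Int) (ys : List Int) :
    ∀ (bm : List (List Int)) (x : Int), 0 ≤ x → x < (bm.length : Int) →
      ys.foldl (fun bm y =>
          PySem.List.pySetD bm x (PySem.List.pySetD (PySem.List.pyGetD bm x []) y (v y))) bm =
        PySem.List.pySetD bm x
          (ys.foldl (fun r y => PySem.List.pySetD r y (v y)) (PySem.List.pyGetD bm x [])) := by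
  induction ys with
  | nil =>
    intro bm x hx hlt
    have hk : x.toNat < bm.length := by omega
    simp only [List.foldl_nil, PySem.List.pySetD_of_nonneg _ _ hx,
      PySem.List.pyGetD_eq_getElem _ _ hx hlt]
    exact (List.set_getElem_self hk).symm
  | cons y ys ih =>
    intro bm x hx hlt
    have hk : x.toNat < bm.length := by omega
    simp only [List.foldl_cons]
    rw [ih _ x hx (by simp [PySem.List.length_pySetD]; omega)]
    simp only [PySem.List.pySetD_of_nonneg _ _ hx,
      PySem.List.pyGetD_eq_getElem _ _ hx hlt]
    rw [PySem.List.pyGetD_eq_getElem _ _ hx (by simpa using hlt),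
      List.getElem_set_self (by simpa using hk), List.set_set]

theorem pv_outerA (matrix : List (List Int)) (nc : List (Int × Int)) (i j columns : Int) :
    ∀ (n : Nat) (bm0 : List (List Int)), n ≤ bm0.length →
      (PySem.List.pyRange 0 (n : Int) 1).foldl
        (fun bm x =>
          (PySem.List.pyRange 0 columns 1).foldl
            (fun bm y => PySem.List.pySetD bm x
              (PySem.List.pySetD (PySem.List.pyGetD bm x []) y (pvVal matrix nc i j x y)))
            (PySem.List.pySetD bm x ((PySem.List.pyRange 0 columns 1).map (fun _ => (0 : Int)))))
        bm0
      = (List.range n).map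
          (fun (x : Nat) => (List.range columns.toNat).map (fun (y : Nat) => pvVal matrix nc i j (x : Int) (y : Int)))
          ++ bm0.drop n := by
  intro n
  induction n with
  | zero => intro bm0 _; simp [PySem.List.pyRange_one_eq_nil]
  | succ n ih =>
    intro bm0 h
    have hcast : (((n + 1 : Nat)) : Int) = (n : Int) + 1 := by push_cast; ring
    rw [hcast, PySem.List.pyRange_one_succ_right (by positivity), List.foldl_append,
      ih bm0 (by omega)]
    simp only [List.foldl_cons, List.foldl_nil]
    set M : List (List Int) :=
      (List.range n).map
        (fun (x : Nat) => (List.range columns.toNat).map (fun (y : Nat) => pvVal matrix nc i j (x : Int) (y : Int)))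
        ++ bm0.drop n with hMdef
    have hM : M.length = bm0.length := by
      simp [hMdef]; omega
    have hlt : ((n : Int)) <
        ((PySem.List.pySetD M (n : Int) ((PySem.List.pyRange 0 columns 1).map (fun _ => (0 : Int)))).length : Int) := by
      rw [PySem.List.length_pySetD]; omega
    rw [pv_rowfold (fun y => pvVal matrix nc i j (n : Int) y) _ _ (n : Int) (by positivity) hlt]
    simp only [PySem.List.pySetD_natCast, PySem.List.pyGetD_natCast]
    rw [List.getD_eq_getElem _ _ (by simp [hM]; omega),
      List.getElem_set_self (by simp [hM]; omega)]
    have hcc : PySem.List.pyRange 0 columns 1 = PySem.List.pyRange 0 ((columns.toNat : Nat) : Int) 1 := by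
      by_cases h : 0 ≤ columns
      · rw [Int.toNat_of_nonneg h]
      · rw [PySem.List.pyRange_one_eq_nil (by omega), PySem.List.pyRange_one_eq_nil (by omega)]
    rw [hcc, pv_foldSet_range (fun y => pvVal matrix nc i j (n : Int) y) columns.toNat
      ((PySem.List.pyRange 0 ((columns.toNat : Nat) : Int) 1).map (fun _ => (0 : Int)))
      (by simp [PySem.List.length_pyRange_one])]
    rw [List.set_set]
    have hdropC :
        (((PySem.List.pyRange 0 ((columns.toNat : Nat) : Int) 1).map (fun _ => (0 : Int))).drop columns.toNat)
          = [] := by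
      simp [PySem.List.length_pyRange_one]
    rw [hdropC, List.append_nil]
    have hn : n < bm0.length := by omega
    have hdrop : bm0.drop n = bm0[n] :: bm0.drop (n + 1) := List.drop_eq_getElem_cons hn
    rw [hMdef, hdrop, List.set_append_right _ _ (by simp), List.range_succ]
    simp
    rw [hdrop, List.set_cons_zero]

theorem pv_Bfold (rows columns : Int) (w : Int → Int → Int) :
    ∀ (l : List (Int × Int)) (bm : List (List Int)),
      bm.length = rows.toNat → (∀ r ∈ bm, r.length = columns.toNat) →
      ((l.foldl (fun bm p =>
          if 0 ≤ p.1 ∧ p.1 < rows ∧ 0 ≤ p.2 ∧ p.2 < columns then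
            PySem.List.pySetD bm p.1
              (PySem.List.pySetD (PySem.List.pyGetD bm p.1 []) p.2 (w p.1 p.2))
          else bm) bm).length = rows.toNat
      ∧ (∀ r ∈ l.foldl (fun bm p =>
          if 0 ≤ p.1 ∧ p.1 < rows ∧ 0 ≤ p.2 ∧ p.2 < columns then
            PySem.List.pySetD bm p.1
              (PySem.List.pySetD (PySem.List.pyGetD bm p.1 []) p.2 (w p.1 p.2))
          else bm) bm, r.length = columns.toNat)
      ∧ (∀ (x y : Nat), x < rows.toNat → y < columns.toNat →
          ((l.foldl (fun bm p =>
              if 0 ≤ p.1 ∧ p.1 < rows ∧ 0 ≤ p.2 ∧ p.2 < columns then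
                PySem.List.pySetD bm p.1
                  (PySem.List.pySetD (PySem.List.pyGetD bm p.1 []) p.2 (w p.1 p.2))
              else bm) bm).getD x []).getD y 0 =
            if ((x : Int), (y : Int)) ∈ l then w x y else (bm.getD x []).getD y 0)) := by
  intro l
  induction l with
  | nil => intro bm h1 h2; exact ⟨h1, h2, by intro x y _ _; simp⟩
  | cons p t ih =>
    intro bm h1 h2
    simp only [List.foldl_cons]
    by_cases hg : 0 ≤ p.1 ∧ p.1 < rows ∧ 0 ≤ p.2 ∧ p.2 < columns
    · rw [if_pos hg]
      obtain ⟨hp1, hp2, hp3, hp4⟩ := hg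
      have hA : p.1.toNat < bm.length := by omega
      have hget : PySem.List.pyGetD bm p.1 [] = bm[p.1.toNat] :=
        PySem.List.pyGetD_eq_getElem _ _ hp1 (by omega)
      have hrowlen : bm[p.1.toNat].length = columns.toNat := h2 _ (List.getElem_mem hA)
      have hB : p.2.toNat < bm[p.1.toNat].length := by omega
      set R' : List Int := PySem.List.pySetD (PySem.List.pyGetD bm p.1 []) p.2 (w p.1 p.2) with hR'
      have hR'eq : R' = bm[p.1.toNat].set p.2.toNat (w p.1 p.2) := by
        rw [hR', hget, PySem.List.pySetD_of_nonneg _ _ hp3]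
      have hR'len : R'.length = columns.toNat := by rw [hR'eq]; simp [hrowlen]
      set bm' : List (List Int) := PySem.List.pySetD bm p.1 R' with hbm'
      have hbm'eq : bm' = bm.set p.1.toNat R' := PySem.List.pySetD_of_nonneg _ _ hp1
      have h1' : bm'.length = rows.toNat := by rw [hbm'eq]; simpa using h1
      have h2' : ∀ r ∈ bm', r.length = columns.toNat := by
        intro r hr'
        rw [hbm'eq] at hr'
        rcases List.mem_or_eq_of_mem_set hr' with h | h
        · exact h2 _ h
        · rw [h]; exact hR'len
      obtain ⟨L, Rw, Cell⟩ := ih bm' h1' h2'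
      refine ⟨L, Rw, ?_⟩
      intro x y hx hy
      rw [Cell x y hx hy]
      have hbmA : bm.getD p.1.toNat [] = bm[p.1.toNat] := List.getD_eq_getElem _ _ hA
      have houter : ∀ (z : Nat), (bm.set p.1.toNat R').getD z [] =
          if z = p.1.toNat then R' else bm.getD z [] := by
        intro z
        by_cases hz : z = p.1.toNat
        · subst hz; simp [List.getD_eq_getElem?_getD, hA]
        · simp [List.getD_eq_getElem?_getD, hz, Ne.symm hz]
      have hinner : ∀ (z : Nat), R'.getD z 0 =
          if z = p.2.toNat then w p.1 p.2 else bm[p.1.toNat].getD z 0 := by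
        intro z
        rw [hR'eq]
        by_cases hz : z = p.2.toNat
        · subst hz; simp [List.getD_eq_getElem?_getD, hB]
        · simp [List.getD_eq_getElem?_getD, hz, Ne.symm hz]
      have hcell' : (bm'.getD x []).getD y 0 =
          if ((x : Int), (y : Int)) = p then w p.1 p.2 else (bm.getD x []).getD y 0 := by
        rw [hbm'eq, houter x]
        by_cases hxp : x = p.1.toNat
        · rw [if_pos hxp, hinner y]
          by_cases hyp : y = p.2.toNat
          · rw [if_pos hyp, if_pos (by
              apply Prod.ext
              · simp [hxp]; omega
              · simp [hyp]; omega)]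
          · rw [if_neg hyp, if_neg (by
              intro hcontra
              apply hyp
              have := congrArg Prod.snd hcontra
              simp at this
              omega)]
            rw [hxp, hbmA]
        · rw [if_neg hxp, if_neg (by
            intro hcontra
            apply hxp
            have := congrArg Prod.fst hcontra
            simp at this
            omega)]
      rw [hcell']
      by_cases hmem : ((x : Int), (y : Int)) ∈ t
      · rw [if_pos hmem, if_pos (List.mem_cons_of_mem _ hmem)]
      · rw [if_neg hmem]
        by_cases hp : ((x : Int), (y : Int)) = p
        · rw [if_pos hp, if_pos (by rw [hp]; exact List.mem_cons_self), ← hp]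
        · rw [if_neg hp, if_neg (by simp [List.mem_cons, hp, hmem])]
    · rw [if_neg hg]
      obtain ⟨L, Rw, Cell⟩ := ih bm h1 h2
      refine ⟨L, Rw, ?_⟩
      intro x y hx hy
      rw [Cell x y hx hy]
      have hne : ((x : Int), (y : Int)) ≠ p := by
        intro hcontra
        apply hg
        rw [← hcontra]
        refine ⟨by positivity, by omega, by positivity, by omega⟩
      simp [List.mem_cons, hne]

theorem pv_fold_keep_nil (rows columns : Int) (w : Int → Int → Int) :
    ∀ (l : List (Int × Int)),
      l.foldl (fun bm p =>
        if 0 ≤ p.1 ∧ p.1 < rows ∧ 0 ≤ p.2 ∧ p.2 < columns then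
          PySem.List.pySetD bm p.1
            (PySem.List.pySetD (PySem.List.pyGetD bm p.1 []) p.2 (w p.1 p.2))
        else bm) ([] : List (List Int)) = [] := by
  intro l
  induction l with
  | nil => rfl
  | cons p t ih =>
    simp only [List.foldl_cons]
    have hstep : (if 0 ≤ p.1 ∧ p.1 < rows ∧ 0 ≤ p.2 ∧ p.2 < columns then
        PySem.List.pySetD ([] : List (List Int)) p.1
          (PySem.List.pySetD (PySem.List.pyGetD ([] : List (List Int)) p.1 []) p.2 (w p.1 p.2))
      else ([] : List (List Int))) = [] := by
      split_ifs
      · exact List.eq_nil_of_length_eq_zero (by rw [PySem.List.length_pySetD]; rfl)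
      · rfl
    rw [hstep]
    exact ih

theorem pv_main (matrix : List (List Int)) (neighbours_coordinates : List (Int × Int))
    (i j rows columns : Int) :
    update_neighbours_py matrix neighbours_coordinates i j rows columns =
      update_neighbours_py_alt matrix neighbours_coordinates i j rows columns := by
  by_cases hrneg : rows < 0
  · -- rows < 0: both loops are empty and both results are []
    have hnil : PySem.List.pyRange 0 rows 1 = [] := PySem.List.pyRange_one_eq_nil (by omega)
    show (PySem.List.pyRange 0 rows 1).foldl _ _ = _
    rw [hnil]
    simp only [List.foldl_nil, List.map_nil]
    show ([] : List (List Int)) =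
      neighbours_coordinates.foldl _ ((PySem.List.pyRange 0 rows 1).map _)
    rw [hnil]
    simp only [List.map_nil]
    exact (pv_fold_keep_nil rows columns
      (fun a b => if PySem.List.pyGetD (PySem.List.pyGetD matrix a []) b 0 >
          PySem.List.pyGetD (PySem.List.pyGetD matrix i []) j 0 then
          PySem.List.pyGetD (PySem.List.pyGetD matrix a []) b 0 -
          PySem.List.pyGetD (PySem.List.pyGetD matrix i []) j 0
        else 0) neighbours_coordinates).symm
  · obtain ⟨R, hR⟩ : ∃ R : Nat, rows = (R : Int) := ⟨rows.toNat, (Int.toNat_of_nonneg (by omega)).symm⟩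
    subst hR
    have hAinit : ((PySem.List.pyRange 0 (R : Int) 1).map (fun _ => ([] : List Int))).length = R := by
      simp [PySem.List.length_pyRange_one]
    -- A computes the canonical table
    have hA : update_neighbours_py matrix neighbours_coordinates i j (R : Int) columns =
        (List.range R).map (fun (x : Nat) =>
          (List.range columns.toNat).map
            (fun (y : Nat) => pvVal matrix neighbours_coordinates i j (x : Int) (y : Int))) := by
      have h := pv_outerA matrix neighbours_coordinates i j columns R
        ((PySem.List.pyRange 0 (R : Int) 1).map (fun _ => ([] : List Int))) (le_of_eq hAinit.symm)
      rw [List.drop_eq_nil_of_le (le_of_eq hAinit), List.append_nil] at h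
      exact h
    rw [hA]
    -- B's initial copy
    set bombed : List (List Int) :=
      (PySem.List.pyRange 0 (R : Int) 1).map (fun x =>
        (PySem.List.pyRange 0 columns 1).map (fun y =>
          PySem.List.pyGetD (PySem.List.pyGetD matrix x []) y 0)) with hbombed
    have hb0len : bombed.length = ((R : Int)).toNat := by
      simp [hbombed, PySem.List.length_pyRange_one]
    have hb0rows : ∀ r ∈ bombed, r.length = columns.toNat := by
      intro r hr'
      obtain ⟨z, _, hz⟩ := List.mem_map.mp hr'
      rw [← hz]
      simp [PySem.List.length_pyRange_one]
    have hB := pv_Bfold (R : Int) columns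
      (fun a b => if PySem.List.pyGetD (PySem.List.pyGetD matrix a []) b 0 >
          PySem.List.pyGetD (PySem.List.pyGetD matrix i []) j 0 then
          PySem.List.pyGetD (PySem.List.pyGetD matrix a []) b 0 -
          PySem.List.pyGetD (PySem.List.pyGetD matrix i []) j 0
        else 0)
      neighbours_coordinates bombed hb0len hb0rows
    obtain ⟨hL, hRw, hCell⟩ := hB
    have hBeq : update_neighbours_py_alt matrix neighbours_coordinates i j (R : Int) columns =
        neighbours_coordinates.foldl (fun bm p =>
          if 0 ≤ p.1 ∧ p.1 < (R : Int) ∧ 0 ≤ p.2 ∧ p.2 < columns then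
            PySem.List.pySetD bm p.1
              (PySem.List.pySetD (PySem.List.pyGetD bm p.1 []) p.2
                ((fun a b => if PySem.List.pyGetD (PySem.List.pyGetD matrix a []) b 0 >
                    PySem.List.pyGetD (PySem.List.pyGetD matrix i []) j 0 then
                    PySem.List.pyGetD (PySem.List.pyGetD matrix a []) b 0 -
                    PySem.List.pyGetD (PySem.List.pyGetD matrix i []) j 0
                  else 0) p.1 p.2))
          else bm) bombed := rfl
    rw [hBeq]
    -- compare cell by cell
    apply List.ext_getElem
    · rw [hL]; simp
    intro n hn1 hn2
    have hnR : n < R := by simpa using hn1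
    apply List.ext_getElem
    · have := hRw _ (List.getElem_mem hn2)
      rw [this]; simp
    intro k hk1 hk2
    have hkC : k < columns.toNat := by
      have := hRw _ (List.getElem_mem hn2)
      rw [this] at hk2
      simpa using hk2
    have hcellB := hCell n k (by simpa using hnR) hkC
    rw [List.getD_eq_getElem _ _ hn2, List.getD_eq_getElem _ _ hk2] at hcellB
    rw [hcellB]
    -- the initial copy's cell is the matrix cell (as Python reads it)
    have hb0cell : ((bombed.getD n []).getD k 0) =
        PySem.List.pyGetD (PySem.List.pyGetD matrix (n : Int) []) (k : Int) 0 := by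
      have hrown : bombed.getD n [] =
          (PySem.List.pyRange 0 columns 1).map (fun y =>
            PySem.List.pyGetD (PySem.List.pyGetD matrix (n : Int) []) y 0) := by
        rw [List.getD_eq_getElem?_getD, hbombed,
          PySem.List.getElem?_map_pyRange_zero _ _ _ (by simpa using hnR)]
        rfl
      rw [hrown, List.getD_eq_getElem?_getD, List.getElem?_map,
        List.getElem?_eq_getElem (by simpa [PySem.List.length_pyRange_one] using hkC)]
      simp [PySem.List.getElem_pyRange_one]
    rw [hb0cell]
    simp only [List.getElem_map, List.getElem_range]
    unfold pvVal
    by_cases hmem : ((n : Int), (k : Int)) ∈ neighbours_coordinates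
    · simp only [if_pos hmem]
    · simp only [if_neg hmem]

-- ===== VERDICT (by name: the statement is the Claim_ definition above) =====
theorem update_neighbours_py_spec : Claim_equal_update_neighbours_py := by
  intro matrix neighbours_coordinates i j rows columns _ _
  exact pv_main matrix neighbours_coordinates i j rows columns
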